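-- pv_equiv track=rewrite | github.com/YashB63/GFG-Daily-Questions | Day 421/Connecting the graph/connecting_the_graph.py | Solve
-- ===== SOURCE A (Python) =====
-- def Solve(n, edges):
--     if len(edges) < n-1:
--         return -1
--
--     visited = [False]*n
--
--     adjList = [[] for _ in range(n)]
--
--     for e in edges:
--         adjList[e[0]].append(e[1])
--         adjList[e[1]].append(e[0])
--
--     def dfs(node):
--         visited[node] = True
--
--         for neighbour in adjList[node]:
--             if not visited[neighbour]:
--                 dfs(neighbour)
--
--     component = 0
--     for i in range(n):
--         if not visited[i]:
--             component += 1
--             dfs(i)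
--
--     return component - 1
-- ===== SOURCE B (Python) =====
-- def Solve(n, edges):
--     if len(edges) < n - 1:
--         return -1
--     comps = list(range(n))
--     count = n
--     for e in edges:
--         a = comps[e[0]]
--         b = comps[e[1]]
--         if a != b:
--             comps = [a if c == b else c for c in comps]
--             count -= 1
--     return count - 1
-- ===== Notes on version B (the rewrite author's own statement) =====
-- stated objective: alternative
-- what changed: Replaces the adjacency-list + recursive-DFS component count by an edge-fold that maintains a component-label array and a live component counter, relabelling one class into the other whenever an edge joins two classes; no graph, visited array or recursion is built.
-- outside the precondition, e.g. on Solve(-2, []): A returns -1, B returns -3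
import Mathlib
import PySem

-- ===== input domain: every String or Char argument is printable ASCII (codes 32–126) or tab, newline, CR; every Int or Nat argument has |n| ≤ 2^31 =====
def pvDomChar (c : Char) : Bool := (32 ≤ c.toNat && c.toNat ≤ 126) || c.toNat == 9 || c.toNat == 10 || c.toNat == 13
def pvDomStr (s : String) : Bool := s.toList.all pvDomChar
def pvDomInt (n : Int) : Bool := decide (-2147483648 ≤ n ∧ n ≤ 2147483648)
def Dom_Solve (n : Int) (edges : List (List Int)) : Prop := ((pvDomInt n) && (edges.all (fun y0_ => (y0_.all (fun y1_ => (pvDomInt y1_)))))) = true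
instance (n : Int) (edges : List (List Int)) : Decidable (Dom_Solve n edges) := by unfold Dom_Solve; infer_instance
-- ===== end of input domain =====

-- B replaces A's adjacency-list + recursive-DFS component count by a single fold over the
-- edges that merges component labels (alternative algorithm, same return value).

-- ===== PORT A =====
-- Python's recursive `dfs` terminates because every recursive call is on a node that the
-- call immediately marks visited; the port carries fuel, called with n.toNat+1, which the
-- equivalence proof shows is never exhausted on inputs admitted by Pre_Solve.
def pvDfs (adj : List (List Int)) : Nat → Int → List Bool → List Bool
  | 0, _, vis => vis
  | fuel+1, node, vis =>
      (PySem.List.pyGetD adj node []).foldl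
        (fun w nb => if PySem.List.pyGetD w nb false = false then pvDfs adj fuel nb w else w)
        (PySem.List.pySetD vis node true)

def Solve (n : Int) (edges : List (List Int)) : Int :=
  if PySem.List.len edges < n - 1 then -1
  else
    let m := n.toNat
    let adj := edges.foldl (fun adj e =>
        let a := PySem.List.pyGetD e 0 0
        let b := PySem.List.pyGetD e 1 0
        let adj1 := PySem.List.pySetD adj a (PySem.List.pyGetD adj a [] ++ [b])
        PySem.List.pySetD adj1 b (PySem.List.pyGetD adj1 b [] ++ [a]))
      (List.replicate m [])
    let res := (PySem.List.pyRange 0 n 1).foldl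
        (fun (s : List Bool × Int) i =>
          if PySem.List.pyGetD s.1 i false = false then (pvDfs adj (m+1) i s.1, s.2 + 1) else s)
        (List.replicate m false, 0)
    res.2 - 1

-- ===== PORT B =====
def Solve_alt (n : Int) (edges : List (List Int)) : Int :=
  if PySem.List.len edges < n - 1 then -1
  else
    let s := edges.foldl (fun (s : List Int × Int) e =>
        let a := PySem.List.pyGetD s.1 (PySem.List.pyGetD e 0 0) 0
        let b := PySem.List.pyGetD s.1 (PySem.List.pyGetD e 1 0) 0
        if a ≠ b then (s.1.map fun c => if c = b then a else c, s.2 - 1) else s)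
      (PySem.List.pyRange 0 n 1, n)
    s.2 - 1

-- ===== PRECONDITION & SPEC =====
-- Pre_Solve restricts to the natural domain: a nonnegative vertex count n (on negative n
-- with empty edges A accidentally returns -1 while B returns n-1), and — unless the
-- too-few-edges guard already answers -1 — every edge must carry two endpoints that are
-- valid Python indices into a length-n list (otherwise A raises IndexError).
def Pre_Solve (n : Int) (edges : List (List Int)) : Prop :=
  0 ≤ n ∧ (PySem.List.len edges < n - 1 ∨
    ∀ e ∈ edges, 2 ≤ e.length ∧ -n ≤ e.getD 0 0 ∧ e.getD 0 0 < n ∧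
      -n ≤ e.getD 1 0 ∧ e.getD 1 0 < n)
instance (n : Int) (edges : List (List Int)) : Decidable (Pre_Solve n edges) := by
  unfold Pre_Solve; infer_instance

def pvWitness_Solve : Int × List (List Int) := (3, [[0, 1], [1, 2]])

def Spec_Solve (n : Int) (edges : List (List Int)) (out : Int) : Prop := out = Solve_alt n edges
instance (n : Int) (edges : List (List Int)) (out : Int) : Decidable (Spec_Solve n edges out) := by
  unfold Spec_Solve; infer_instance

-- ===== CLAIM (what is proved, stated in full; the proofs are below) =====
def Claim_equal_Solve : Prop := ∀ (n : Int) (edges : List (List Int)),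
  Dom_Solve n edges → Pre_Solve n edges → Spec_Solve n edges (Solve n edges)

-- ===== LEMMAS AND PROOFS =====

/-- Normalised (Python negative-wrap) index into a length-`n.toNat` list. -/
def nidx (n v : Int) : Nat := (if v < 0 then v + n else v).toNat

/-- The edges as pairs of normalised endpoints. -/
def pvPairs (n : Int) (edges : List (List Int)) : List (Nat × Nat) :=
  edges.map (fun e => (nidx n (e.getD 0 0), nidx n (e.getD 1 0)))

/-- One undirected step along an edge of `P`. -/
def pvSt (P : List (Nat × Nat)) (i j : Nat) : Prop := (i, j) ∈ P ∨ (j, i) ∈ P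

/-- Connectivity: reflexive-transitive closure of `pvSt`. -/
def pvConn (P : List (Nat × Nat)) (i j : Nat) : Prop := Relation.ReflTransGen (pvSt P) i j

/-- Validity of the edge list (the non-guard branch of `Pre_Solve`). -/
def pvValid (n : Int) (edges : List (List Int)) : Prop :=
  ∀ e ∈ edges, 2 ≤ e.length ∧ -n ≤ e.getD 0 0 ∧ e.getD 0 0 < n ∧
    -n ≤ e.getD 1 0 ∧ e.getD 1 0 < n

/-- Invariant tying A's adjacency list to the normalised pair list. -/
def pvAdjInv (n : Int) (P : List (Nat × Nat)) (adj : List (List Int)) : Prop :=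
  adj.length = n.toNat ∧
  (∀ p ∈ P, p.1 < n.toNat ∧ p.2 < n.toNat) ∧
  (∀ i, i < n.toNat → ∀ v ∈ adj.getD i [], -n ≤ v ∧ v < n) ∧
  (∀ i j, i < n.toNat → (pvSt P i j ↔ ∃ v ∈ adj.getD i [], nidx n v = j))

/-- Invariant of B's fold. -/
def pvBInv (n : Int) (P : List (Nat × Nat)) (comps : List Int) (count : Int) : Prop :=
  comps.length = n.toNat ∧
  (∀ i j, i < n.toNat → j < n.toNat →
    (comps.getD i 0 = comps.getD j 0 ↔ pvConn P i j)) ∧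
  count = (comps.toFinset.card : Int)

/-- Pointwise monotonicity of visited arrays. -/
def pvMono (xs ys : List Bool) : Prop := List.Forall₂ (fun a b => a = true → b = true) xs ys

-- ---- small bridging lemmas ----

theorem nidx_lt (n v : Int) (h0 : 0 ≤ n) (h1 : -n ≤ v) (h2 : v < n) : nidx n v < n.toNat := by
  unfold nidx; split <;> omega

theorem nidx_nonneg (n : Int) (v : Nat) : nidx n (v : Int) = v := by
  unfold nidx; split <;> omega

theorem pyGetD_nidx {α : Type} (xs : List α) (n v : Int) (d : α)
    (hlen : xs.length = n.toNat) (h0 : 0 ≤ n) (h1 : -n ≤ v) (h2 : v < n) :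
    PySem.List.pyGetD xs v d = xs.getD (nidx n v) d := by
  unfold PySem.List.pyGetD PySem.List.pyGet? PySem.List.pyIdx? nidx
  split_ifs with ha hb hc <;> simp_all [List.getD] <;> first | omega | (congr 2; omega)

theorem pySetD_nidx {α : Type} (xs : List α) (n v : Int) (x : α)
    (hlen : xs.length = n.toNat) (h0 : 0 ≤ n) (h1 : -n ≤ v) (h2 : v < n) :
    PySem.List.pySetD xs v x = xs.set (nidx n v) x := by
  unfold PySem.List.pySetD PySem.List.pySet? PySem.List.pyIdx? nidx
  split_ifs with ha hb hc <;> simp_all <;> first | omega | (congr 2; omega)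

theorem getD_eq_getElem {α : Type} (l : List α) (i : Nat) (d : α) (h : i < l.length) :
    l.getD i d = l[i] := by
  simp [List.getD, List.getElem?_eq_getElem h]

theorem getD_set_eq {α : Type} (l : List α) (i : Nat) (v d : α) (h : i < l.length) :
    (l.set i v).getD i d = v := by
  rw [getD_eq_getElem _ _ _ (by simpa using h)]
  simp [List.getElem_set_self]

theorem getD_set_ne {α : Type} (l : List α) (i j : Nat) (v d : α) (h : i ≠ j) :
    (l.set i v).getD j d = l.getD j d := by
  simp [List.getD, List.getElem?_set_ne h]

theorem toFinset_map' (l : List Int) (f : Int → Int) :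
    (l.map f).toFinset = l.toFinset.image f := by
  ext x
  simp [List.mem_map]

-- ---- pvSt / pvConn basics ----

theorem pvSt_symm (P : List (Nat × Nat)) (i j : Nat) (h : pvSt P i j) : pvSt P j i := h.symm

theorem pvConn_symm (P : List (Nat × Nat)) (i j : Nat) (h : pvConn P i j) : pvConn P j i :=
  Relation.ReflTransGen.symmetric (fun _ _ h => pvSt_symm P _ _ h) h

theorem pvSt_lt (n : Int) (P : List (Nat × Nat)) (hb : ∀ p ∈ P, p.1 < n.toNat ∧ p.2 < n.toNat)
    (i j : Nat) (h : pvSt P i j) : i < n.toNat ∧ j < n.toNat := by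
  rcases h with h | h
  · exact ⟨(hb _ h).1, (hb _ h).2⟩
  · exact ⟨(hb _ h).2, (hb _ h).1⟩

theorem pvConn_lt (n : Int) (P : List (Nat × Nat)) (hb : ∀ p ∈ P, p.1 < n.toNat ∧ p.2 < n.toNat)
    (i j : Nat) (h : pvConn P i j) (hi : i < n.toNat) : j < n.toNat := by
  induction h with
  | refl => exact hi
  | tail _ hs _ => exact (pvSt_lt n P hb _ _ hs).2

theorem pvConn_nil (i j : Nat) : pvConn [] i j ↔ i = j := by
  constructor
  · intro h
    induction h with
    | refl => rfl
    | tail _ hs _ => rcases hs with h | h <;> simp at h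
  · rintro rfl; exact Relation.ReflTransGen.refl

/-- Adding one edge to `P`: the new connectivity. -/
theorem pvConn_append (P : List (Nat × Nat)) (a b i j : Nat) :
    pvConn (P ++ [(a, b)]) i j ↔
      pvConn P i j ∨ (pvConn P i a ∧ pvConn P b j) ∨ (pvConn P i b ∧ pvConn P a j) := by
  constructor
  · intro h
    induction h with
    | refl => exact Or.inl Relation.ReflTransGen.refl
    | @tail c d _ hs ih =>
      have hs' : pvSt P c d ∨ (c = a ∧ d = b) ∨ (c = b ∧ d = a) := by
        rcases hs with h | h <;> simp only [List.mem_append, List.mem_singleton] at h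
        · rcases h with h | h
          · exact Or.inl (Or.inl h)
          · rw [Prod.ext_iff] at h
            exact Or.inr (Or.inl ⟨h.1, h.2⟩)
        · rcases h with h | h
          · exact Or.inl (Or.inr h)
          · rw [Prod.ext_iff] at h
            exact Or.inr (Or.inr ⟨h.2, h.1⟩)
      rcases hs' with hod | ⟨rfl, rfl⟩ | ⟨rfl, rfl⟩
      · rcases ih with h | ⟨h1, h2⟩ | ⟨h1, h2⟩
        · exact Or.inl (h.tail hod)
        · exact Or.inr (Or.inl ⟨h1, h2.tail hod⟩)
        · exact Or.inr (Or.inr ⟨h1, h2.tail hod⟩)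
      · rcases ih with h | ⟨h1, h2⟩ | ⟨h1, h2⟩
        · exact Or.inr (Or.inl ⟨h, Relation.ReflTransGen.refl⟩)
        · exact Or.inr (Or.inl ⟨h1, Relation.ReflTransGen.refl⟩)
        · exact Or.inl h1
      · rcases ih with h | ⟨h1, h2⟩ | ⟨h1, h2⟩
        · exact Or.inr (Or.inr ⟨h, Relation.ReflTransGen.refl⟩)
        · exact Or.inl h1
        · exact Or.inr (Or.inr ⟨h1, Relation.ReflTransGen.refl⟩)
  · have mono : ∀ x y, pvConn P x y → pvConn (P ++ [(a, b)]) x y := by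
      intro x y h
      exact Relation.ReflTransGen.mono
        (fun u v hs => by rcases hs with h | h
                          · exact Or.inl (List.mem_append_left _ h)
                          · exact Or.inr (List.mem_append_left _ h)) h
    have hab : pvConn (P ++ [(a, b)]) a b :=
      Relation.ReflTransGen.single (Or.inl (List.mem_append_right _ (by simp)))
    rintro (h | ⟨h1, h2⟩ | ⟨h1, h2⟩)
    · exact mono _ _ h
    · exact ((mono _ _ h1).trans hab).trans (mono _ _ h2)
    · exact ((mono _ _ h1).trans (pvConn_symm _ _ _ hab)).trans (mono _ _ h2)

theorem pvConn_append_of_conn (P : List (Nat × Nat)) (a b i j : Nat) (hab : pvConn P a b) :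
    pvConn (P ++ [(a, b)]) i j ↔ pvConn P i j := by
  rw [pvConn_append]
  constructor
  · rintro (h | ⟨h1, h2⟩ | ⟨h1, h2⟩)
    · exact h
    · exact (h1.trans hab).trans h2
    · exact (h1.trans (pvConn_symm _ _ _ hab)).trans h2
  · exact Or.inl

-- ---- pvMono basics ----

theorem pvMono_refl (xs : List Bool) : pvMono xs xs := by
  induction xs with
  | nil => exact List.Forall₂.nil
  | cons x l ih => exact List.Forall₂.cons (fun h => h) ih

theorem pvMono_trans (xs ys zs : List Bool) (h1 : pvMono xs ys) (h2 : pvMono ys zs) :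
    pvMono xs zs := by
  induction h1 generalizing zs with
  | nil => exact h2
  | cons h _ ih =>
    cases h2 with
    | cons h' t' => exact List.Forall₂.cons (fun hx => h' (h hx)) (ih _ t')

theorem pvMono_length (xs ys : List Bool) (h : pvMono xs ys) : xs.length = ys.length :=
  h.length_eq

theorem pvMono_getD (xs ys : List Bool) (h : pvMono xs ys) (j : Nat)
    (hx : xs.getD j false = true) : ys.getD j false = true := by
  induction h generalizing j with
  | nil => simp at hx
  | cons h _ ih =>
    cases j with
    | zero => exact h hx
    | succ j => exact ih j hx

theorem pvMono_set_true (xs : List Bool) (j : Nat) : pvMono xs (xs.set j true) := by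
  induction xs generalizing j with
  | nil => exact List.Forall₂.nil
  | cons x l ih =>
    cases j with
    | zero => exact List.Forall₂.cons (fun _ => rfl) (pvMono_refl l)
    | succ j => exact List.Forall₂.cons (fun h => h) (ih j)

theorem pvMono_count (xs ys : List Bool) (h : pvMono xs ys) :
    ys.count false ≤ xs.count false := by
  induction h with
  | nil => simp
  | cons h _ ih =>
    rename_i a b _ _
    simp only [List.count_cons]
    cases a <;> cases b
    all_goals simp_all
    all_goals omega

theorem count_set_true (xs : List Bool) (j : Nat) (hj : j < xs.length)
    (hx : xs.getD j false = false) : (xs.set j true).count false + 1 = xs.count false := by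
  induction xs generalizing j with
  | nil => simp at hj
  | cons x l ih =>
    cases j with
    | zero => cases x <;> simp_all
    | succ j =>
      simp only [List.length_cons] at hj
      have := ih j (by omega) hx
      cases x <;> simp_all

-- ---- adjacency construction ----

theorem adj_build_step (n : Int) (h0 : 0 ≤ n) (P0 : List (Nat × Nat)) (acc : List (List Int))
    (e : List Int) (hinv : pvAdjInv n P0 acc)
    (he : 2 ≤ e.length ∧ -n ≤ e.getD 0 0 ∧ e.getD 0 0 < n ∧ -n ≤ e.getD 1 0 ∧ e.getD 1 0 < n) :
    pvAdjInv n (P0 ++ [(nidx n (e.getD 0 0), nidx n (e.getD 1 0))])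
      (let a := PySem.List.pyGetD e 0 0
       let b := PySem.List.pyGetD e 1 0
       let adj1 := PySem.List.pySetD acc a (PySem.List.pyGetD acc a [] ++ [b])
       PySem.List.pySetD adj1 b (PySem.List.pyGetD adj1 b [] ++ [a])) := by
  obtain ⟨hlen, hbnd, hval, hiff⟩ := hinv
  obtain ⟨hel, h0a, h0b, h1a, h1b⟩ := he
  have hg0 : PySem.List.pyGetD e 0 0 = e.getD 0 0 := PySem.List.pyGetD_zero e 0
  have hg1 : PySem.List.pyGetD e 1 0 = e.getD 1 0 := by
    rw [show (1 : Int) = ((1 : Nat) : Int) by norm_num, PySem.List.pyGetD_natCast]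
  set e0 := e.getD 0 0 with he0
  set e1 := e.getD 1 0 with he1
  set a' := nidx n e0 with ha'
  set b' := nidx n e1 with hb'
  have ha'm : a' < n.toNat := nidx_lt n e0 h0 h0a h0b
  have hb'm : b' < n.toNat := nidx_lt n e1 h0 h1a h1b
  have hset1 : PySem.List.pySetD acc e0 (PySem.List.pyGetD acc e0 [] ++ [e1]) =
      acc.set a' (acc.getD a' [] ++ [e1]) := by
    rw [pyGetD_nidx acc n e0 [] hlen h0 h0a h0b, pySetD_nidx acc n e0 _ hlen h0 h0a h0b]
  have hlen1 : (acc.set a' (acc.getD a' [] ++ [e1])).length = n.toNat := by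
    simp [hlen]
  set adj1 := acc.set a' (acc.getD a' [] ++ [e1]) with hadj1
  have hset2 : PySem.List.pySetD adj1 e1 (PySem.List.pyGetD adj1 e1 [] ++ [e0]) =
      adj1.set b' (adj1.getD b' [] ++ [e0]) := by
    rw [pyGetD_nidx adj1 n e1 [] hlen1 h0 h1a h1b, pySetD_nidx adj1 n e1 _ hlen1 h0 h1a h1b]
  simp only [hg0, hg1, hset1, hset2]
  have hadj1g : ∀ i, adj1.getD i [] =
      if i = a' then acc.getD a' [] ++ [e1] else acc.getD i [] := by
    intro i
    by_cases hia : i = a'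
    · rw [if_pos hia, hia, hadj1, getD_set_eq _ _ _ _ (by omega)]
    · rw [if_neg hia, hadj1, getD_set_ne _ _ _ _ _ (fun h => hia h.symm)]
  have hmem : ∀ i v, i < n.toNat →
      (v ∈ (adj1.set b' (adj1.getD b' [] ++ [e0])).getD i [] ↔
        v ∈ acc.getD i [] ∨ (i = a' ∧ v = e1) ∨ (i = b' ∧ v = e0)) := by
    intro i v hi
    have hres : (adj1.set b' (adj1.getD b' [] ++ [e0])).getD i [] =
        if i = b' then adj1.getD b' [] ++ [e0] else adj1.getD i [] := by
      by_cases hib : i = b'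
      · rw [if_pos hib, hib, getD_set_eq _ _ _ _ (by omega)]
      · rw [if_neg hib, getD_set_ne _ _ _ _ _ (fun h => hib h.symm)]
    have key : (adj1.set b' (adj1.getD b' [] ++ [e0])).getD i [] =
        acc.getD i [] ++ ((if i = a' then [e1] else []) ++ (if i = b' then [e0] else [])) := by
      rw [hres, hadj1g b', hadj1g i]
      by_cases hib : i = b' <;> by_cases hia : i = a' <;> by_cases hba : b' = a' <;> simp_all
    rw [key]
    by_cases hia : i = a' <;> by_cases hib : i = b' <;> simp [hia, hib]
  refine ⟨by simp [hlen1], ?_, ?_, ?_⟩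
  · intro p hp
    rcases List.mem_append.mp hp with h | h
    · exact hbnd p h
    · simp only [List.mem_singleton] at h
      subst h
      exact ⟨ha'm, hb'm⟩
  · intro i hi v hv
    rcases (hmem i v hi).mp hv with h | ⟨_, rfl⟩ | ⟨_, rfl⟩
    · exact hval i hi v h
    · exact ⟨h1a, h1b⟩
    · exact ⟨h0a, h0b⟩
  · intro i j hi
    have hstiff : pvSt (P0 ++ [(a', b')]) i j ↔
        pvSt P0 i j ∨ (i = a' ∧ j = b') ∨ (i = b' ∧ j = a') := by
      unfold pvSt
      simp only [List.mem_append, List.mem_singleton, Prod.mk.injEq]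
      tauto
    rw [hstiff, hiff i j hi]
    constructor
    · rintro (⟨v, hv, rfl⟩ | ⟨rfl, rfl⟩ | ⟨rfl, rfl⟩)
      · exact ⟨v, (hmem i _ hi).mpr (Or.inl hv), rfl⟩
      · exact ⟨e1, (hmem a' e1 hi).mpr (Or.inr (Or.inl ⟨rfl, rfl⟩)), rfl⟩
      · exact ⟨e0, (hmem b' e0 hi).mpr (Or.inr (Or.inr ⟨rfl, rfl⟩)), rfl⟩
    · rintro ⟨v, hv, rfl⟩
      rcases (hmem i v hi).mp hv with h | ⟨rfl, rfl⟩ | ⟨rfl, rfl⟩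
      · exact Or.inl ⟨v, h, rfl⟩
      · exact Or.inr (Or.inl ⟨rfl, rfl⟩)
      · exact Or.inr (Or.inr ⟨rfl, rfl⟩)

theorem adj_build (n : Int) (h0 : 0 ≤ n) (edges : List (List Int)) :
    ∀ (P0 : List (Nat × Nat)) (acc : List (List Int)), pvAdjInv n P0 acc → pvValid n edges →
    pvAdjInv n (P0 ++ pvPairs n edges)
      (edges.foldl (fun adj e =>
        let a := PySem.List.pyGetD e 0 0
        let b := PySem.List.pyGetD e 1 0
        let adj1 := PySem.List.pySetD adj a (PySem.List.pyGetD adj a [] ++ [b])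
        PySem.List.pySetD adj1 b (PySem.List.pyGetD adj1 b [] ++ [a])) acc) := by
  induction edges with
  | nil => intro P0 acc h _; simpa [pvPairs] using h
  | cons e es ih =>
    intro P0 acc h hv
    have he := hv e (List.mem_cons_self ..)
    have h1 := adj_build_step n h0 P0 acc e h he
    have h2 := ih _ _ h1 (fun e' he' => hv e' (List.mem_cons_of_mem _ he'))
    simpa [pvPairs, List.append_assoc] using h2

theorem adj_init (n : Int) :
    pvAdjInv n [] (List.replicate n.toNat []) := by
  refine ⟨by simp, by simp, ?_, ?_⟩
  · intro i hi v hv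
    rw [getD_eq_getElem _ _ _ (by simpa using hi)] at hv
    simp at hv
  · intro i j hi
    constructor
    · rintro (h | h) <;> simp at h
    · rintro ⟨v, hv, _⟩
      rw [getD_eq_getElem _ _ _ (by simpa using hi)] at hv
      simp at hv

-- ---- the DFS lemma ----

theorem dfs_main (n : Int) (h0 : 0 ≤ n) (P : List (Nat × Nat)) (adj : List (List Int))
    (hadj : pvAdjInv n P adj) :
    ∀ (fuel : Nat) (node : Int) (vis : List Bool),
      vis.length = n.toNat → -n ≤ node → node < n →
      vis.count false < fuel →
      vis.getD (nidx n node) false = false →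
      pvMono vis (pvDfs adj fuel node vis) ∧
      (pvDfs adj fuel node vis).getD (nidx n node) false = true ∧
      (∀ j, j < n.toNat → (pvDfs adj fuel node vis).getD j false = true →
        vis.getD j false = true ∨ pvConn P (nidx n node) j) ∧
      (∀ j k, j < n.toNat → (pvDfs adj fuel node vis).getD j false = true →
        vis.getD j false = false → pvSt P j k → (pvDfs adj fuel node vis).getD k false = true) := by
  obtain ⟨halen, hbnd, hval, haiff⟩ := hadj
  intro fuel
  induction fuel with
  | zero =>
    intro node vis hlen hn1 hn2 hfuel hunv
    exact absurd hfuel (Nat.not_lt_zero _)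
  | succ f IH =>
    intro node vis hlen hn1 hn2 hfuel hunv
    have hn'm : nidx n node < n.toNat := nidx_lt n node h0 hn1 hn2
    have hred : pvDfs adj (f+1) node vis =
        (adj.getD (nidx n node) []).foldl
          (fun w nb => if PySem.List.pyGetD w nb false = false then pvDfs adj f nb w else w)
          (vis.set (nidx n node) true) := by
      simp only [pvDfs]
      rw [pySetD_nidx vis n node true hlen h0 hn1 hn2,
        pyGetD_nidx adj n node [] halen h0 hn1 hn2]
    have hlen0 : (vis.set (nidx n node) true).length = n.toNat := by simp [hlen]
    have hcnt0 : (vis.set (nidx n node) true).count false + 1 = vis.count false :=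
      count_set_true vis (nidx n node) (by omega) hunv
    have inner : ∀ (l' : List Int) (w : List Bool),
        (∀ v ∈ l', ((-n ≤ v ∧ v < n) ∧ pvSt P (nidx n node) (nidx n v))) →
        pvMono (vis.set (nidx n node) true) w →
        (∀ j, j < n.toNat → w.getD j false = true →
          vis.getD j false = true ∨ pvConn P (nidx n node) j) →
        (∀ j k, j < n.toNat → w.getD j false = true → vis.getD j false = false →
          j ≠ nidx n node → pvSt P j k → w.getD k false = true) →
        pvMono w (l'.foldl
          (fun w nb => if PySem.List.pyGetD w nb false = false then pvDfs adj f nb w else w) w) ∧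
        (∀ j, j < n.toNat → (l'.foldl
            (fun w nb => if PySem.List.pyGetD w nb false = false then pvDfs adj f nb w else w) w).getD j false = true →
          vis.getD j false = true ∨ pvConn P (nidx n node) j) ∧
        (∀ j k, j < n.toNat → (l'.foldl
            (fun w nb => if PySem.List.pyGetD w nb false = false then pvDfs adj f nb w else w) w).getD j false = true →
          vis.getD j false = false → j ≠ nidx n node → pvSt P j k →
          (l'.foldl
            (fun w nb => if PySem.List.pyGetD w nb false = false then pvDfs adj f nb w else w) w).getD k false = true) ∧
        (∀ v ∈ l', (l'.foldl
            (fun w nb => if PySem.List.pyGetD w nb false = false then pvDfs adj f nb w else w) w).getD (nidx n v) false = true) := by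
      intro l'
      induction l' with
      | nil =>
        intro w _ hmono hsound hclosed
        exact ⟨pvMono_refl w, hsound, hclosed, by simp⟩
      | cons v l'' ihl =>
        intro w hl' hmono hsound hclosed
        obtain ⟨⟨hv1, hv2⟩, hvst⟩ := hl' v (List.mem_cons_self ..)
        have hwlen : w.length = n.toNat := by
          have := pvMono_length _ _ hmono
          omega
        have hvm : nidx n v < n.toNat := nidx_lt n v h0 hv1 hv2
        have hg : PySem.List.pyGetD w v false = w.getD (nidx n v) false :=
          pyGetD_nidx w n v false hwlen h0 hv1 hv2
        rw [List.foldl_cons]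
        by_cases hwv : w.getD (nidx n v) false = false
        · have hstep : (if PySem.List.pyGetD w v false = false then pvDfs adj f v w else w)
              = pvDfs adj f v w := by
            rw [hg, if_pos hwv]
          rw [hstep]
          have hwcnt : w.count false < f := by
            have h1 := pvMono_count _ _ hmono
            omega
          obtain ⟨m1, c1, s1, e1⟩ := IH v w hwlen hv1 hv2 hwcnt hwv
          have hmono1 : pvMono (vis.set (nidx n node) true) (pvDfs adj f v w) :=
            pvMono_trans _ _ _ hmono m1
          have hsound1 : ∀ j, j < n.toNat → (pvDfs adj f v w).getD j false = true →
              vis.getD j false = true ∨ pvConn P (nidx n node) j := by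
            intro j hj hwj
            rcases s1 j hj hwj with h | h
            · exact hsound j hj h
            · exact Or.inr (Relation.ReflTransGen.head hvst h)
          have hclosed1 : ∀ j k, j < n.toNat → (pvDfs adj f v w).getD j false = true →
              vis.getD j false = false → j ≠ nidx n node → pvSt P j k →
              (pvDfs adj f v w).getD k false = true := by
            intro j k hj hwj hvisj hjn hst
            cases hwjold : w.getD j false with
            | true => exact pvMono_getD _ _ m1 k (hclosed j k hj hwjold hvisj hjn hst)
            | false => exact e1 j k hj hwj hwjold hst
          obtain ⟨m2, s2, e2, v2⟩ := ihl (pvDfs adj f v w)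
            (fun u hu => hl' u (List.mem_cons_of_mem _ hu)) hmono1 hsound1 hclosed1
          refine ⟨pvMono_trans _ _ _ m1 m2, s2, e2, ?_⟩
          intro u hu
          rcases List.mem_cons.mp hu with rfl | hu
          · exact pvMono_getD _ _ m2 _ c1
          · exact v2 u hu
        · have hwv' : w.getD (nidx n v) false = true := by
            cases h : w.getD (nidx n v) false
            · exact absurd h hwv
            · rfl
          have hstep : (if PySem.List.pyGetD w v false = false then pvDfs adj f v w else w)
              = w := by
            rw [hg, if_neg (fun h => (by decide : (true : Bool) ≠ false) (hwv'.symm.trans h))]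
          rw [hstep]
          obtain ⟨m2, s2, e2, v2⟩ := ihl w
            (fun u hu => hl' u (List.mem_cons_of_mem _ hu)) hmono hsound hclosed
          refine ⟨m2, s2, e2, ?_⟩
          intro u hu
          rcases List.mem_cons.mp hu with rfl | hu
          · exact pvMono_getD _ _ m2 _ hwv'
          · exact v2 u hu
    have hl' : ∀ v ∈ adj.getD (nidx n node) [], ((-n ≤ v ∧ v < n) ∧ pvSt P (nidx n node) (nidx n v)) := by
      intro v hv
      exact ⟨hval (nidx n node) hn'm v hv, (haiff (nidx n node) (nidx n v) hn'm).mpr ⟨v, hv, rfl⟩⟩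
    have hsound0 : ∀ j, j < n.toNat → (vis.set (nidx n node) true).getD j false = true →
        vis.getD j false = true ∨ pvConn P (nidx n node) j := by
      intro j hj hv0
      by_cases hjn : j = nidx n node
      · exact Or.inr (hjn ▸ Relation.ReflTransGen.refl)
      · rw [getD_set_ne _ _ _ _ _ (fun h => hjn h.symm)] at hv0
        exact Or.inl hv0
    have hclosed0 : ∀ j k, j < n.toNat → (vis.set (nidx n node) true).getD j false = true →
        vis.getD j false = false → j ≠ nidx n node → pvSt P j k →
        (vis.set (nidx n node) true).getD k false = true := by
      intro j k hj hv0 hvisj hjn _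
      rw [getD_set_ne _ _ _ _ _ (fun h => hjn h.symm)] at hv0
      rw [hv0] at hvisj
      exact absurd hvisj (by simp)
    obtain ⟨mI, sI, eI, vI⟩ := inner (adj.getD (nidx n node) []) (vis.set (nidx n node) true)
      hl' (pvMono_refl _) hsound0 hclosed0
    rw [hred]
    have hself : ((adj.getD (nidx n node) []).foldl
        (fun w nb => if PySem.List.pyGetD w nb false = false then pvDfs adj f nb w else w)
        (vis.set (nidx n node) true)).getD (nidx n node) false = true :=
      pvMono_getD _ _ mI _ (getD_set_eq vis (nidx n node) true false (by omega))
    refine ⟨pvMono_trans _ _ _ (pvMono_set_true vis (nidx n node)) mI, hself, sI, ?_⟩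
    intro j k hj hR hvisj hst
    by_cases hjn : j = nidx n node
    · rw [hjn] at hst
      obtain ⟨v, hv, hvk⟩ := (haiff (nidx n node) k hn'm).mp hst
      rw [← hvk]
      exact vI v hv
    · exact eI j k hj hR hvisj hjn hst

/-- The clean corollary: from a conn-closed visited set, DFS marks exactly the class. -/
theorem dfs_class (n : Int) (h0 : 0 ≤ n) (P : List (Nat × Nat)) (adj : List (List Int))
    (hadj : pvAdjInv n P adj) (node : Int) (vis : List Bool)
    (hlen : vis.length = n.toNat) (hn1 : -n ≤ node) (hn2 : node < n)
    (hfuel : vis.count false < n.toNat + 1)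
    (hunv : vis.getD (nidx n node) false = false)
    (hclosed : ∀ j k, j < n.toNat → vis.getD j false = true → pvConn P j k →
      vis.getD k false = true) :
    ∀ j, j < n.toNat →
      ((pvDfs adj (n.toNat + 1) node vis).getD j false = true ↔
        vis.getD j false = true ∨ pvConn P (nidx n node) j) := by
  obtain ⟨hmono, hself, hsound, hstep⟩ :=
    dfs_main n h0 P adj hadj (n.toNat + 1) node vis hlen hn1 hn2 hfuel hunv
  intro j hj
  constructor
  · exact hsound j hj
  · rintro (h | h)
    · exact pvMono_getD _ _ hmono j h
    · -- follow the path; every node on it is newly marked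
      have hb := hadj.2.1
      have key : ∀ j, pvConn P (nidx n node) j →
          (pvDfs adj (n.toNat + 1) node vis).getD j false = true ∧ vis.getD j false = false := by
        intro j hc
        induction hc with
        | refl => exact ⟨hself, hunv⟩
        | @tail c d hc' hs ih =>
          have hcm : c < n.toNat := pvConn_lt n P hb _ _ hc' (nidx_lt n node h0 hn1 hn2)
          have hdm : d < n.toNat := (pvSt_lt n P hb _ _ hs).2
          refine ⟨hstep c d hcm ih.1 ih.2 hs, ?_⟩
          by_contra hvd
          have hvd' : vis.getD d false = true := by
            cases hd : vis.getD d false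
            · exact absurd hd hvd
            · rfl
          have : vis.getD (nidx n node) false = true :=
            hclosed d (nidx n node) hdm hvd'
              (pvConn_symm _ _ _ ((hc'.tail hs)))
          rw [this] at hunv; exact absurd hunv (by simp)
      exact (key j h).1

-- ---- B's fold ----

theorem b_fold_step (n : Int) (h0 : 0 ≤ n) (P0 : List (Nat × Nat)) (comps : List Int)
    (count : Int) (e : List Int) (hinv : pvBInv n P0 comps count)
    (he : 2 ≤ e.length ∧ -n ≤ e.getD 0 0 ∧ e.getD 0 0 < n ∧ -n ≤ e.getD 1 0 ∧ e.getD 1 0 < n) :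
    pvBInv n (P0 ++ [(nidx n (e.getD 0 0), nidx n (e.getD 1 0))])
      ((fun (s : List Int × Int) e =>
        let a := PySem.List.pyGetD s.1 (PySem.List.pyGetD e 0 0) 0
        let b := PySem.List.pyGetD s.1 (PySem.List.pyGetD e 1 0) 0
        if a ≠ b then (s.1.map fun c => if c = b then a else c, s.2 - 1) else s) (comps, count) e).1
      ((fun (s : List Int × Int) e =>
        let a := PySem.List.pyGetD s.1 (PySem.List.pyGetD e 0 0) 0
        let b := PySem.List.pyGetD s.1 (PySem.List.pyGetD e 1 0) 0
        if a ≠ b then (s.1.map fun c => if c = b then a else c, s.2 - 1) else s) (comps, count) e).2 := by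
  obtain ⟨hlen, hiff, hcnt⟩ := hinv
  obtain ⟨hel, h0a, h0b, h1a, h1b⟩ := he
  have hg0 : PySem.List.pyGetD e 0 0 = e.getD 0 0 := PySem.List.pyGetD_zero e 0
  have hg1 : PySem.List.pyGetD e 1 0 = e.getD 1 0 := by
    rw [show (1 : Int) = ((1 : Nat) : Int) by norm_num, PySem.List.pyGetD_natCast]
  have ha'm : nidx n (e.getD 0 0) < n.toNat := nidx_lt n _ h0 h0a h0b
  have hb'm : nidx n (e.getD 1 0) < n.toNat := nidx_lt n _ h0 h1a h1b
  have hga : PySem.List.pyGetD comps (e.getD 0 0) 0 = comps.getD (nidx n (e.getD 0 0)) 0 :=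
    pyGetD_nidx comps n _ 0 hlen h0 h0a h0b
  have hgb : PySem.List.pyGetD comps (e.getD 1 0) 0 = comps.getD (nidx n (e.getD 1 0)) 0 :=
    pyGetD_nidx comps n _ 0 hlen h0 h1a h1b
  have hred : ((fun (s : List Int × Int) e =>
        let a := PySem.List.pyGetD s.1 (PySem.List.pyGetD e 0 0) 0
        let b := PySem.List.pyGetD s.1 (PySem.List.pyGetD e 1 0) 0
        if a ≠ b then (s.1.map fun c => if c = b then a else c, s.2 - 1) else s) (comps, count) e) =
      if comps.getD (nidx n (e.getD 0 0)) 0 ≠ comps.getD (nidx n (e.getD 1 0)) 0 then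
        (comps.map fun c => if c = comps.getD (nidx n (e.getD 1 0)) 0 then
            comps.getD (nidx n (e.getD 0 0)) 0 else c, count - 1)
      else (comps, count) := by
    show (if PySem.List.pyGetD comps (PySem.List.pyGetD e 0 0) 0 ≠
            PySem.List.pyGetD comps (PySem.List.pyGetD e 1 0) 0 then _ else ((comps, count) : List Int × Int)) = _
    rw [hg0, hg1, hga, hgb]
  rw [hred]
  set a' := nidx n (e.getD 0 0) with ha'
  set b' := nidx n (e.getD 1 0) with hb'
  by_cases hab : comps.getD a' 0 = comps.getD b' 0
  · rw [if_neg (not_not_intro hab)]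
    have hconn : pvConn P0 a' b' := (hiff a' b' ha'm hb'm).mp hab
    refine ⟨hlen, ?_, hcnt⟩
    intro i j hi hj
    rw [pvConn_append_of_conn P0 a' b' i j hconn]
    exact hiff i j hi hj
  · rw [if_pos hab]
    have hmap : ∀ i, i < n.toNat →
        (comps.map fun c => if c = comps.getD b' 0 then comps.getD a' 0 else c).getD i 0 =
          (if comps.getD i 0 = comps.getD b' 0 then comps.getD a' 0 else comps.getD i 0) := by
      intro i hi
      have h2 : i < comps.length := by omega
      have he' : comps[i] = comps.getD i 0 := (getD_eq_getElem _ _ _ h2).symm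
      rw [getD_eq_getElem _ _ _ (by simpa [hlen] using hi), List.getElem_map, he']
    have hf : ∀ x y : Int,
        ((if x = comps.getD b' 0 then comps.getD a' 0 else x) =
          (if y = comps.getD b' 0 then comps.getD a' 0 else y)) ↔
        (x = y ∨ (x = comps.getD a' 0 ∧ y = comps.getD b' 0) ∨
          (x = comps.getD b' 0 ∧ y = comps.getD a' 0)) := by
      intro x y
      by_cases h1 : x = comps.getD b' 0 <;> by_cases h2 : y = comps.getD b' 0
      · rw [if_pos h1, if_pos h2]
        exact ⟨fun _ => Or.inl (h1.trans h2.symm), fun _ => rfl⟩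
      · rw [if_pos h1, if_neg h2]
        constructor
        · intro h; exact Or.inr (Or.inr ⟨h1, h.symm⟩)
        · rintro (h | ⟨ha2, hb2⟩ | ⟨ha2, hb2⟩)
          · exact absurd (h.symm.trans h1) h2
          · exact absurd hb2 h2
          · exact hb2.symm
      · rw [if_neg h1, if_pos h2]
        constructor
        · intro h; exact Or.inr (Or.inl ⟨h, h2⟩)
        · rintro (h | ⟨ha2, hb2⟩ | ⟨ha2, hb2⟩)
          · exact absurd (h.trans h2) h1
          · exact ha2
          · exact absurd ha2 h1
      · rw [if_neg h1, if_neg h2]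
        constructor
        · exact Or.inl
        · rintro (h | ⟨ha2, hb2⟩ | ⟨ha2, hb2⟩)
          · exact h
          · exact absurd hb2 h2
          · exact absurd ha2 h1
    refine ⟨by simpa using hlen, ?_, ?_⟩
    · intro i j hi hj
      rw [hmap i hi, hmap j hj, hf, pvConn_append]
      have h1 := hiff i j hi hj
      have h2 := hiff i a' hi ha'm
      have h3 := hiff b' j hb'm hj
      have h4 := hiff i b' hi hb'm
      have h5 := hiff a' j ha'm hj
      constructor
      · rintro (h | ⟨ha2, hb2⟩ | ⟨ha2, hb2⟩)
        · exact Or.inl (h1.mp h)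
        · exact Or.inr (Or.inl ⟨h2.mp ha2, h3.mp hb2.symm⟩)
        · exact Or.inr (Or.inr ⟨h4.mp ha2, h5.mp hb2.symm⟩)
      · rintro (h | ⟨ha2, hb2⟩ | ⟨ha2, hb2⟩)
        · exact Or.inl (h1.mpr h)
        · exact Or.inr (Or.inl ⟨h2.mpr ha2, (h3.mpr hb2).symm⟩)
        · exact Or.inr (Or.inr ⟨h4.mpr ha2, (h5.mpr hb2).symm⟩)
    · have hlamem : comps.getD a' 0 ∈ comps.toFinset := by
        rw [List.mem_toFinset, getD_eq_getElem _ _ _ (by omega)]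
        exact List.getElem_mem _
      have hlbmem : comps.getD b' 0 ∈ comps.toFinset := by
        rw [List.mem_toFinset, getD_eq_getElem _ _ _ (by omega)]
        exact List.getElem_mem _
      have himg : (comps.map fun c => if c = comps.getD b' 0 then comps.getD a' 0 else c).toFinset =
          comps.toFinset.erase (comps.getD b' 0) := by
        rw [toFinset_map']
        ext x
        simp only [Finset.mem_image, Finset.mem_erase, List.mem_toFinset] at *
        constructor
        · rintro ⟨c, hc, rfl⟩
          by_cases hclb : c = comps.getD b' 0
          · rw [hclb, if_pos rfl]
            exact ⟨fun h => hab h, hlamem⟩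
          · rw [if_neg hclb]
            exact ⟨hclb, hc⟩
        · rintro ⟨hx, hxmem⟩
          exact ⟨x, hxmem, by rw [if_neg hx]⟩
      rw [himg, Finset.card_erase_of_mem hlbmem]
      have hpos : 0 < comps.toFinset.card := Finset.card_pos.mpr ⟨comps.getD b' 0, hlbmem⟩
      rw [hcnt]
      omega

theorem b_fold (n : Int) (h0 : 0 ≤ n) (edges : List (List Int)) :
    ∀ (P0 : List (Nat × Nat)) (comps : List Int) (count : Int),
      pvBInv n P0 comps count → pvValid n edges →
      pvBInv n (P0 ++ pvPairs n edges)
        (edges.foldl (fun (s : List Int × Int) e =>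
          let a := PySem.List.pyGetD s.1 (PySem.List.pyGetD e 0 0) 0
          let b := PySem.List.pyGetD s.1 (PySem.List.pyGetD e 1 0) 0
          if a ≠ b then (s.1.map fun c => if c = b then a else c, s.2 - 1) else s)
          (comps, count)).1
        (edges.foldl (fun (s : List Int × Int) e =>
          let a := PySem.List.pyGetD s.1 (PySem.List.pyGetD e 0 0) 0
          let b := PySem.List.pyGetD s.1 (PySem.List.pyGetD e 1 0) 0
          if a ≠ b then (s.1.map fun c => if c = b then a else c, s.2 - 1) else s)
          (comps, count)).2 := by
  induction edges with
  | nil => intro P0 comps count h _; simpa [pvPairs] using h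
  | cons e es ih =>
    intro P0 comps count h hv
    have he := hv e (List.mem_cons_self ..)
    have h1 := b_fold_step n h0 P0 comps count e h he
    have h2 := ih _ _ _ h1 (fun e' he' => hv e' (List.mem_cons_of_mem _ he'))
    simpa [pvPairs, List.append_assoc] using h2

theorem b_init (n : Int) (h0 : 0 ≤ n) :
    pvBInv n [] (PySem.List.pyRange 0 n 1) n := by
  have hlen : (PySem.List.pyRange 0 n 1).length = n.toNat := by
    rw [PySem.List.length_pyRange_one]; omega
  refine ⟨hlen, ?_, ?_⟩
  · intro i j hi hj
    rw [getD_eq_getElem _ _ _ (by omega), getD_eq_getElem _ _ _ (by omega),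
      PySem.List.getElem_pyRange_one, PySem.List.getElem_pyRange_one, pvConn_nil]
    omega
  · rw [List.toFinset_card_of_nodup (PySem.List.nodup_pyRange_one 0 n), hlen]
    omega

-- ---- A's outer loop ----

theorem a_outer (n : Int) (h0 : 0 ≤ n) (P : List (Nat × Nat)) (adj : List (List Int))
    (hadj : pvAdjInv n P adj) (compsF : List Int)
    (hcomps : compsF.length = n.toNat ∧ ∀ i j, i < n.toNat → j < n.toNat →
      (compsF.getD i 0 = compsF.getD j 0 ↔ pvConn P i j)) :
    ∀ (i0 : Nat), i0 ≤ n.toNat →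
      ((PySem.List.pyRange 0 (i0 : Int) 1).foldl
        (fun (s : List Bool × Int) i =>
          if PySem.List.pyGetD s.1 i false = false then (pvDfs adj (n.toNat+1) i s.1, s.2 + 1) else s)
        (List.replicate n.toNat false, 0)).1.length = n.toNat ∧
      (∀ j, j < n.toNat →
        (((PySem.List.pyRange 0 (i0 : Int) 1).foldl
          (fun (s : List Bool × Int) i =>
            if PySem.List.pyGetD s.1 i false = false then (pvDfs adj (n.toNat+1) i s.1, s.2 + 1) else s)
          (List.replicate n.toNat false, 0)).1.getD j false = true ↔ ∃ k, k < i0 ∧ pvConn P k j)) ∧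
      ((PySem.List.pyRange 0 (i0 : Int) 1).foldl
        (fun (s : List Bool × Int) i =>
          if PySem.List.pyGetD s.1 i false = false then (pvDfs adj (n.toNat+1) i s.1, s.2 + 1) else s)
        (List.replicate n.toNat false, 0)).2 =
        (((Finset.range i0).image (fun i => compsF.getD i 0)).card : Int) := by
  obtain ⟨hclen, hciff⟩ := hcomps
  have hbnd := hadj.2.1
  intro i0
  induction i0 with
  | zero =>
    intro _
    rw [show ((0 : Nat) : Int) = 0 by norm_num, PySem.List.pyRange_one_eq_nil (le_refl 0)]
    refine ⟨by simp, ?_, by simp⟩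
    intro j hj
    rw [getD_eq_getElem _ _ _ (by simpa using hj)]
    simp
  | succ i0 ihi =>
    intro hi1
    obtain ⟨hSlen, hSchar, hScomp⟩ := ihi (by omega)
    have hsplit : PySem.List.pyRange 0 ((i0 + 1 : Nat) : Int) 1 =
        PySem.List.pyRange 0 (i0 : Int) 1 ++ [(i0 : Int)] := by
      rw [show ((i0 + 1 : Nat) : Int) = (i0 : Int) + 1 by push_cast; ring]
      exact PySem.List.pyRange_one_succ_right (by omega)
    rw [hsplit, List.foldl_append]
    set S := (PySem.List.pyRange 0 (i0 : Int) 1).foldl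
        (fun (s : List Bool × Int) i =>
          if PySem.List.pyGetD s.1 i false = false then (pvDfs adj (n.toNat+1) i s.1, s.2 + 1) else s)
        (List.replicate n.toNat false, 0) with hS
    have hg : PySem.List.pyGetD S.1 (i0 : Int) false = S.1.getD i0 false := by
      simp [PySem.List.pyGetD_natCast]
    simp only [List.foldl_cons, List.foldl_nil]
    have hi0m : i0 < n.toNat := by omega
    by_cases hvis : S.1.getD i0 false = false
    · rw [hg, if_pos hvis]
      have hn1 : -n ≤ (i0 : Int) := by omega
      have hn2 : (i0 : Int) < n := by omega
      have hni : nidx n (i0 : Int) = i0 := nidx_nonneg n i0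
      have hfuel : S.1.count false < n.toNat + 1 := by
        have := List.count_le_length (l := S.1) (a := false)
        omega
      have hunv : S.1.getD (nidx n (i0 : Int)) false = false := by rw [hni]; exact hvis
      have hclosed : ∀ j k, j < n.toNat → S.1.getD j false = true → pvConn P j k →
          S.1.getD k false = true := by
        intro j k hj hSj hconn
        have hkm : k < n.toNat := pvConn_lt n P hbnd j k hconn hj
        obtain ⟨k', hk', hck'⟩ := (hSchar j hj).mp hSj
        exact (hSchar k hkm).mpr ⟨k', hk', hck'.trans hconn⟩
      have hiff := dfs_class n h0 P adj hadj (i0 : Int) S.1 hSlen hn1 hn2 hfuel hunv hclosed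
      obtain ⟨hmono, _, _, _⟩ :=
        dfs_main n h0 P adj hadj (n.toNat + 1) (i0 : Int) S.1 hSlen hn1 hn2 hfuel hunv
      refine ⟨?_, ?_, ?_⟩
      · show (pvDfs adj (n.toNat + 1) (i0 : Int) S.1).length = n.toNat
        have := pvMono_length _ _ hmono
        omega
      · intro j hj
        rw [hiff j hj, hSchar j hj, hni]
        constructor
        · rintro (⟨k, hk, hc⟩ | hc)
          · exact ⟨k, by omega, hc⟩
          · exact ⟨i0, by omega, hc⟩
        · rintro ⟨k, hk, hc⟩
          by_cases hki : k = i0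
          · exact Or.inr (hki ▸ hc)
          · exact Or.inl ⟨k, by omega, hc⟩
      · have hnotmem : compsF.getD i0 0 ∉ (Finset.range i0).image (fun i => compsF.getD i 0) := by
          intro hmem
          obtain ⟨k, hk, hck⟩ := Finset.mem_image.mp hmem
          rw [Finset.mem_range] at hk
          have hconn : pvConn P k i0 := (hciff k i0 (by omega) hi0m).mp hck
          have : S.1.getD i0 false = true := (hSchar i0 hi0m).mpr ⟨k, hk, hconn⟩
          rw [this] at hvis
          exact absurd hvis (by simp)
        rw [Finset.range_add_one, Finset.image_insert, Finset.card_insert_of_notMem hnotmem,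
          hScomp]
        push_cast
        ring
    · have hvis' : S.1.getD i0 false = true := by
        cases h : S.1.getD i0 false
        · exact absurd h hvis
        · rfl
      rw [hg, if_neg (fun h => (by decide : (true : Bool) ≠ false) (hvis'.symm.trans h))]
      have hmem : compsF.getD i0 0 ∈ (Finset.range i0).image (fun i => compsF.getD i 0) := by
        obtain ⟨k, hk, hconn⟩ := (hSchar i0 hi0m).mp hvis'
        exact Finset.mem_image.mpr ⟨k, Finset.mem_range.mpr hk,
          (hciff k i0 (by omega) hi0m).mpr hconn⟩
      refine ⟨hSlen, ?_, ?_⟩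
      · intro j hj
        rw [hSchar j hj]
        constructor
        · rintro ⟨k, hk, hc⟩
          exact ⟨k, by omega, hc⟩
        · rintro ⟨k, hk, hc⟩
          by_cases hki : k = i0
          · subst hki
            obtain ⟨k', hk', hconn'⟩ := (hSchar k hi0m).mp hvis'
            exact ⟨k', hk', hconn'.trans hc⟩
          · exact ⟨k, by omega, hc⟩
      · rw [Finset.range_add_one, Finset.image_insert, Finset.insert_eq_self.mpr hmem, hScomp]

-- ---- toFinset as image ----

theorem toFinset_eq_image (l : List Int) :
    l.toFinset = (Finset.range l.length).image (fun i => l.getD i 0) := by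
  ext x
  simp only [List.mem_toFinset, Finset.mem_image, Finset.mem_range]
  constructor
  · intro hx
    obtain ⟨i, hi, hx⟩ := List.mem_iff_getElem.mp hx
    exact ⟨i, hi, by rw [getD_eq_getElem _ _ _ hi]; exact hx⟩
  · rintro ⟨i, hi, rfl⟩
    rw [getD_eq_getElem _ _ _ hi]
    exact List.getElem_mem hi

-- ===== VERDICT (by name: the statement is the Claim_ definition above) =====
theorem Solve_spec : Claim_equal_Solve := by
  intro n edges _ hpre
  unfold Spec_Solve Solve Solve_alt
  obtain ⟨h0, hpre2⟩ := hpre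
  simp only [PySem.List.len_eq]
  by_cases hg : (edges.length : Int) < n - 1
  · simp [hg]
  · simp only [hg, if_false]
    have hv : pvValid n edges := by
      rcases hpre2 with h | h
      · rw [PySem.List.len_eq] at h; exact absurd h hg
      · exact h
    have hadjI := adj_build n h0 edges [] (List.replicate n.toNat []) (adj_init n) hv
    rw [List.nil_append] at hadjI
    have hBI := b_fold n h0 edges [] (PySem.List.pyRange 0 n 1) n (b_init n h0) hv
    rw [List.nil_append] at hBI
    obtain ⟨hclen, hciff, hccnt⟩ := hBI
    have hA := a_outer n h0 (pvPairs n edges) _ hadjI _ ⟨hclen, hciff⟩ n.toNat le_rfl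
    rw [show ((n.toNat : Nat) : Int) = n by omega] at hA
    obtain ⟨_, _, hcomp⟩ := hA
    have hcard : ((Finset.range n.toNat).image (fun i =>
        ((edges.foldl (fun (s : List Int × Int) e =>
          let a := PySem.List.pyGetD s.1 (PySem.List.pyGetD e 0 0) 0
          let b := PySem.List.pyGetD s.1 (PySem.List.pyGetD e 1 0) 0
          if a ≠ b then (s.1.map fun c => if c = b then a else c, s.2 - 1) else s)
          (PySem.List.pyRange 0 n 1, n)).1).getD i 0)).card
      = ((edges.foldl (fun (s : List Int × Int) e =>
          let a := PySem.List.pyGetD s.1 (PySem.List.pyGetD e 0 0) 0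
          let b := PySem.List.pyGetD s.1 (PySem.List.pyGetD e 1 0) 0
          if a ≠ b then (s.1.map fun c => if c = b then a else c, s.2 - 1) else s)
          (PySem.List.pyRange 0 n 1, n)).1).toFinset.card := by
      rw [toFinset_eq_image, hclen]
    have key : ((PySem.List.pyRange 0 n 1).foldl
        (fun (s : List Bool × Int) i =>
          if PySem.List.pyGetD s.1 i false = false then
            (pvDfs (edges.foldl (fun adj e =>
                let a := PySem.List.pyGetD e 0 0
                let b := PySem.List.pyGetD e 1 0
                let adj1 := PySem.List.pySetD adj a (PySem.List.pyGetD adj a [] ++ [b])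
                PySem.List.pySetD adj1 b (PySem.List.pyGetD adj1 b [] ++ [a]))
              (List.replicate n.toNat [])) (n.toNat+1) i s.1, s.2 + 1)
          else s)
        (List.replicate n.toNat false, 0)).2
      = ((edges.foldl (fun (s : List Int × Int) e =>
          let a := PySem.List.pyGetD s.1 (PySem.List.pyGetD e 0 0) 0
          let b := PySem.List.pyGetD s.1 (PySem.List.pyGetD e 1 0) 0
          if a ≠ b then (s.1.map fun c => if c = b then a else c, s.2 - 1) else s)
        (PySem.List.pyRange 0 n 1, n)).2) := by
      rw [hcomp, hccnt, hcard]
    exact congrArg (fun t : Int => t - 1) key
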